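-- pv_equiv track=rewrite | github.com/athm793/decision-maker-engine | backend/app/services/decision_maker_rules.py | build_query_keywords
-- ===== SOURCE A (Python) =====
-- def decision_maker_query_keywords() -> list[str]:
--     return [
--         "CEO",
--         "Founder",
--         "\"Co-Founder\"",
--         "Owner",
--         "President",
--         "\"Managing Director\"",
--         "\"General Manager\"",
--         "\"Senior Head\"",
--         "\"Head of\"",
--         "\"Senior Director\"",
--         "Director",
--         "\"Senior Vice President\"",
--         "\"Vice President\"",
--         "SVP",
--         "VP",
--         "COO",
--         "CFO",
--         "CTO",
--         "CIO",
--         "CMO",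
--         "Partner",
--         "Principal",
--         "\"Managing Partner\"",
--         "\"Managing Member\"",
--         "Chairman",
--     ]
--
-- def build_query_keywords(seniorities: list[str] | None, departments: list[str] | None) -> list[str]:
--     base = decision_maker_query_keywords()
--     s_in = [str(x).strip() for x in (seniorities or []) if str(x).strip()]
--     d_in = [str(x).strip() for x in (departments or []) if str(x).strip()]
--
--     if not s_in and not d_in:
--         return base
--
--     s_norm: list[str] = []
--     seen_s: set[str] = set()
--     for s in s_in:
--         k = s.lower()
--         if k in seen_s:
--             continue
--         seen_s.add(k)
--         s_norm.append(s)
--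
--     d_norm: list[str] = []
--     seen_d: set[str] = set()
--     for d in d_in:
--         k = d.lower()
--         if k in seen_d:
--             continue
--         seen_d.add(k)
--         d_norm.append(d)
--
--     out: list[str] = []
--     out.extend(["CEO", "Founder", "\"Co-Founder\"", "Owner", "President", "\"Managing Director\"", "\"General Manager\""])
--     out.extend(s_norm)
--
--     for s in s_norm or ["Head", "Director", "VP", "SVP", "Vice President", "Senior Vice President"]:
--         for d in d_norm:
--             out.append(f"\"{s} {d}\"")
--             out.append(f"\"{s} of {d}\"")
--
--     seen: set[str] = set()
--     deduped: list[str] = []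
--     for x in out:
--         xs = str(x).strip()
--         if not xs:
--             continue
--         k = xs.lower()
--         if k in seen:
--             continue
--         seen.add(k)
--         deduped.append(xs)
--     return deduped or base
-- ===== SOURCE B (Python) =====
-- def decision_maker_query_keywords() -> list[str]:
--     return [
--         "CEO",
--         "Founder",
--         "\"Co-Founder\"",
--         "Owner",
--         "President",
--         "\"Managing Director\"",
--         "\"General Manager\"",
--         "\"Senior Head\"",
--         "\"Head of\"",
--         "\"Senior Director\"",
--         "Director",
--         "\"Senior Vice President\"",
--         "\"Vice President\"",
--         "SVP",
--         "VP",
--         "COO",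
--         "CFO",
--         "CTO",
--         "CIO",
--         "CMO",
--         "Partner",
--         "Principal",
--         "\"Managing Partner\"",
--         "\"Managing Member\"",
--         "Chairman",
--     ]
--
--
-- def build_query_keywords(seniorities, departments):
--     # Streaming build: no intermediate candidate list and no per-list
--     # pre-deduplication; each keyword is emitted through one seen-set
--     # (case-insensitive, first occurrence wins) at the moment it is generated.
--     base = decision_maker_query_keywords()
--     s_in = [t for t in (str(x).strip() for x in (seniorities or [])) if t]
--     d_in = [t for t in (str(x).strip() for x in (departments or [])) if t]
--
--     if not s_in and not d_in:
--         return base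
--
--     # every candidate below is already stripped and nonempty (inputs were
--     # pre-stripped, the rest are fixed words or quoted combinations)
--     seen = set()
--     out = []
--
--     def emit(t):
--         k = t.lower()
--         if k not in seen:
--             seen.add(k)
--             out.append(t)
--
--     for x in ("CEO", "Founder", "\"Co-Founder\"", "Owner", "President",
--               "\"Managing Director\"", "\"General Manager\""):
--         emit(x)
--     for s in s_in:
--         emit(s)
--     for s in (s_in or ["Head", "Director", "VP", "SVP", "Vice President", "Senior Vice President"]):
--         for d in d_in:
--             emit(f"\"{s} {d}\"")
--             emit(f"\"{s} of {d}\"")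
--     return out or base
-- ===== Notes on version B (the rewrite author's own statement) =====
-- stated objective: simpler
-- what changed: B replaces A's staged pipeline (pre-dedup each input list, materialise a full candidate list, then a final strip-and-dedup pass) with a single streaming pass: every keyword is pushed through one emit() gate (case-insensitive seen-set, first occurrence wins) at the moment it is generated, so no intermediate candidate list and none of A's three separate dedup loops exist; duplicate-heavy inputs make B generate more (immediately discarded) combinations than A.
import Mathlib
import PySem

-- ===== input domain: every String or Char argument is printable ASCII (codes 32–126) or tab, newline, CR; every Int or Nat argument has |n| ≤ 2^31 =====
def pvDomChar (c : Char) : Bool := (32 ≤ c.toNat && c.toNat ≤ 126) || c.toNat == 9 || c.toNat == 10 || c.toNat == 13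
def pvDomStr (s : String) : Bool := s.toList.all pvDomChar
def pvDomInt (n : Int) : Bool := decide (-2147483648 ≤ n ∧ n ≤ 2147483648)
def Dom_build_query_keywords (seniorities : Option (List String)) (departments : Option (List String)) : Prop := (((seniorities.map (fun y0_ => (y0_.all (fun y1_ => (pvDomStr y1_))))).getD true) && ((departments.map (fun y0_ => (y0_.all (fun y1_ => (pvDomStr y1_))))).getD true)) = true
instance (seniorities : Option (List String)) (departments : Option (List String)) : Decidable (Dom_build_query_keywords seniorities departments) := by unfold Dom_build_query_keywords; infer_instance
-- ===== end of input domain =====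

-- B emits every keyword through one streaming case-insensitive seen-set as it is
-- generated (no intermediate candidate list, no per-list pre-deduplication);
-- objective: simpler (one streaming pass instead of A's three dedup passes).

-- ===== PORT A =====
def pvBase : List String :=
  ["CEO", "Founder", "\"Co-Founder\"", "Owner", "President", "\"Managing Director\"",
   "\"General Manager\"", "\"Senior Head\"", "\"Head of\"", "\"Senior Director\"", "Director",
   "\"Senior Vice President\"", "\"Vice President\"", "SVP", "VP", "COO", "CFO", "CTO", "CIO",
   "CMO", "Partner", "Principal", "\"Managing Partner\"", "\"Managing Member\"", "Chairman"]

-- [str(x).strip() for x in (l or []) if str(x).strip()]  (shared by both Pythons verbatim)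
def pvStripClean (xs : List String) : List String :=
  (xs.map PySem.Str.strip).filter (fun t => decide (t ≠ ""))

-- f"\"{s} {d}\"" and f"\"{s} of {d}\""  (shared by both Pythons verbatim)
def pvCombo (s d : String) : String := "\"" ++ s ++ " " ++ d ++ "\""
def pvComboOf (s d : String) : String := "\"" ++ s ++ " of " ++ d ++ "\""

def pvC7 : List String :=
  ["CEO", "Founder", "\"Co-Founder\"", "Owner", "President", "\"Managing Director\"",
   "\"General Manager\""]

def pvDefaultHeads : List String :=
  ["Head", "Director", "VP", "SVP", "Vice President", "Senior Vice President"]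

-- A's s_norm/d_norm loop: seen-set of lowercased keys, append first occurrences
def pvDedupLower (xs : List String) : List String :=
  (xs.foldl
    (fun (st : PySem.Set String × List String) s =>
      let k := PySem.Str.lower s
      if PySem.Set.contains st.1 k then st else (PySem.Set.add st.1 k, st.2 ++ [s]))
    (PySem.Set.ofList [], [])).2

-- A's final loop: strip, skip empties, dedup on the lowercased key
def pvFinalDedup (xs : List String) : List String :=
  (xs.foldl
    (fun (st : PySem.Set String × List String) x =>
      let t := PySem.Str.strip x
      if t = "" then st
      else
        let k := PySem.Str.lower t
        if PySem.Set.contains st.1 k then st else (PySem.Set.add st.1 k, st.2 ++ [t]))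
    (PySem.Set.ofList [], [])).2

def build_query_keywords (seniorities : Option (List String)) (departments : Option (List String)) : List String :=
  let base := pvBase
  let s_in := pvStripClean (seniorities.getD [])
  let d_in := pvStripClean (departments.getD [])
  if s_in.isEmpty && d_in.isEmpty then base
  else
    let s_norm := pvDedupLower s_in
    let d_norm := pvDedupLower d_in
    let out := pvC7 ++ s_norm
    let out := (if s_norm.isEmpty then pvDefaultHeads else s_norm).foldl
      (fun acc s => d_norm.foldl (fun acc d => acc ++ [pvCombo s d] ++ [pvComboOf s d]) acc) out
    let deduped := pvFinalDedup out
    if deduped.isEmpty then base else deduped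

-- ===== PORT B =====
-- B's emit(t): skip already-seen lowercase key, else record and append
def pvEmit (st : PySem.Set String × List String) (t : String) :
    PySem.Set String × List String :=
  let k := PySem.Str.lower t
  if PySem.Set.contains st.1 k then st else (PySem.Set.add st.1 k, st.2 ++ [t])

def build_query_keywords_alt (seniorities : Option (List String)) (departments : Option (List String)) : List String :=
  let base := pvBase
  let s_in := pvStripClean (seniorities.getD [])
  let d_in := pvStripClean (departments.getD [])
  if s_in.isEmpty && d_in.isEmpty then base
  else
    -- seen = set(); out = []; then the three emit loops, threading (seen, out)
    let st := (["CEO", "Founder", "\"Co-Founder\"", "Owner", "President",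
        "\"Managing Director\"", "\"General Manager\""] : List String).foldl pvEmit
      (PySem.Set.ofList [], [])
    let st := s_in.foldl pvEmit st
    let heads := if s_in.isEmpty then
      ["Head", "Director", "VP", "SVP", "Vice President", "Senior Vice President"] else s_in
    let st := heads.foldl
      (fun st s => d_in.foldl
        (fun st d => pvEmit (pvEmit st (pvCombo s d)) (pvComboOf s d)) st) st
    if st.2.isEmpty then base else st.2

-- ===== PRECONDITION & SPEC =====
def Spec_build_query_keywords (seniorities : Option (List String)) (departments : Option (List String)) (out : List String) : Prop := out = build_query_keywords_alt seniorities departments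
instance (seniorities : Option (List String)) (departments : Option (List String)) (out : List String) : Decidable (Spec_build_query_keywords seniorities departments out) := by unfold Spec_build_query_keywords; infer_instance

-- ===== CLAIM (what is proved, stated in full; the proofs are below) =====
def Claim_equal_build_query_keywords : Prop := ∀ (seniorities : Option (List String)) (departments : Option (List String)), Dom_build_query_keywords seniorities departments → Spec_build_query_keywords seniorities departments (build_query_keywords seniorities departments)

-- ===== LEMMAS AND PROOFS =====

-- ---- string facts ----
theorem pvStrExt {s t : String} (h : s.toList = t.toList) : s = t := by
  have := congrArg String.ofList h
  simpa using this

theorem pvDropWhile_fix {p : Char → Bool} {l : List Char} (h : l.dropWhile p = l) :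
    l.dropWhile p = l ∧ ∀ (a : Char) (l' : List Char), l = a :: l' → p a = false := by
  refine ⟨h, ?_⟩
  intro a l' hl
  subst hl
  by_contra hpa
  have hpa' : p a = true := by
    cases hv : p a with
    | false => exact absurd hv hpa
    | true => rfl
  have : (a :: l').dropWhile p = l'.dropWhile p := by simp [hpa']
  have hlen := congrArg List.length (this ▸ h)
  have := List.length_dropWhile_le p l'
  simp at hlen
  omega

theorem pvLstrip_rstrip {l : List Char} (h : PySem.Chars.lstrip l = l) :
    PySem.Chars.lstrip (PySem.Chars.rstrip l) = PySem.Chars.rstrip l := by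
  have hpre : PySem.Chars.rstrip l <+: l := by
    have hsuf : l.reverse.dropWhile PySem.Chars.isspace <:+ l.reverse := List.dropWhile_suffix _
    have := List.reverse_prefix.mpr hsuf
    simpa [PySem.Chars.rstrip] using this
  cases hr : PySem.Chars.rstrip l with
  | nil => simp [PySem.Chars.lstrip]
  | cons a u =>
    have hl : ∃ rest, l = a :: rest := by
      rcases hpre with ⟨t, ht⟩
      rw [hr] at ht
      exact ⟨u ++ t, by simpa using ht.symm⟩
    rcases hl with ⟨rest, hrest⟩
    have hpa : PySem.Chars.isspace a = false :=
      (pvDropWhile_fix (p := PySem.Chars.isspace) (l := l) (by simpa [PySem.Chars.lstrip] using h)).2 a rest hrest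
    simp [PySem.Chars.lstrip, hpa]

theorem pvChars_strip_idem (l : List Char) :
    PySem.Chars.strip (PySem.Chars.strip l) = PySem.Chars.strip l := by
  have hlfix : PySem.Chars.lstrip (PySem.Chars.lstrip l) = PySem.Chars.lstrip l := by
    simp [PySem.Chars.lstrip, List.dropWhile_idempotent]
  have h1 : PySem.Chars.lstrip (PySem.Chars.rstrip (PySem.Chars.lstrip l))
      = PySem.Chars.rstrip (PySem.Chars.lstrip l) := pvLstrip_rstrip hlfix
  have h2 : PySem.Chars.rstrip (PySem.Chars.rstrip (PySem.Chars.lstrip l))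
      = PySem.Chars.rstrip (PySem.Chars.lstrip l) := by
    simp [PySem.Chars.rstrip, List.dropWhile_idempotent]
  simp only [PySem.Chars.strip, h1, h2]

theorem pvStrip_idem (s : String) : PySem.Str.strip (PySem.Str.strip s) = PySem.Str.strip s := by
  simp [PySem.Str.strip, pvChars_strip_idem]

theorem pvChars_strip_quote (mid : List Char) :
    PySem.Chars.strip ('"' :: mid ++ ['"']) = '"' :: mid ++ ['"'] := by
  have h1 : PySem.Chars.lstrip ('"' :: mid ++ ['"']) = '"' :: mid ++ ['"'] := by
    simp [PySem.Chars.lstrip, show PySem.Chars.isspace '"' = false by decide]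
  have h2 : PySem.Chars.rstrip ('"' :: mid ++ ['"']) = '"' :: mid ++ ['"'] := by
    simp [PySem.Chars.rstrip, List.reverse_append,
      show PySem.Chars.isspace '"' = false by decide]
  simp only [PySem.Chars.strip]
  rw [h1, h2]

theorem pvToList_combo (s d : String) :
    (pvCombo s d).toList = '"' :: (s.toList ++ (' ' :: (d.toList ++ ['"']))) := by
  simp [pvCombo]

theorem pvToList_comboOf (s d : String) :
    (pvComboOf s d).toList = '"' :: (s.toList ++ (' ' :: 'o' :: 'f' :: ' ' :: (d.toList ++ ['"']))) := by
  simp [pvComboOf]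

theorem pvStrip_combo (s d : String) : PySem.Str.strip (pvCombo s d) = pvCombo s d := by
  apply pvStrExt
  have := pvChars_strip_quote (s.toList ++ ' ' :: d.toList)
  simp only [PySem.Str.strip, String.toList_ofList, pvToList_combo]
  simpa using this

theorem pvStrip_comboOf (s d : String) : PySem.Str.strip (pvComboOf s d) = pvComboOf s d := by
  apply pvStrExt
  have := pvChars_strip_quote (s.toList ++ ' ' :: 'o' :: 'f' :: ' ' :: d.toList)
  simp only [PySem.Str.strip, String.toList_ofList, pvToList_comboOf]
  simpa using this

theorem pvCombo_ne (s d : String) : pvCombo s d ≠ "" := by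
  intro h
  have := congrArg String.toList h
  simp [pvToList_combo] at this

theorem pvComboOf_ne (s d : String) : pvComboOf s d ≠ "" := by
  intro h
  have := congrArg String.toList h
  simp [pvToList_comboOf] at this

theorem pvLower_combo (s d : String) :
    PySem.Str.lower (pvCombo s d) = pvCombo (PySem.Str.lower s) (PySem.Str.lower d) := by
  apply pvStrExt
  simp [PySem.Str.lower, pvToList_combo, PySem.Chars.lower,
    show PySem.Chars.lowerChar '"' = '"' by decide, show PySem.Chars.lowerChar ' ' = ' ' by decide]

theorem pvLower_comboOf (s d : String) :
    PySem.Str.lower (pvComboOf s d) = pvComboOf (PySem.Str.lower s) (PySem.Str.lower d) := by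
  apply pvStrExt
  simp [PySem.Str.lower, pvToList_comboOf, PySem.Chars.lower,
    show PySem.Chars.lowerChar '"' = '"' by decide, show PySem.Chars.lowerChar ' ' = ' ' by decide,
    show PySem.Chars.lowerChar 'o' = 'o' by decide, show PySem.Chars.lowerChar 'f' = 'f' by decide]

-- ---- the keyed first-occurrence dedup, and its algebra ----
def kd : List String → List String → List String
  | _, [] => []
  | seen, x :: xs =>
    if PySem.Str.lower x ∈ seen then kd seen xs
    else x :: kd (seen ++ [PySem.Str.lower x]) xs

theorem kd_congr : ∀ (xs S T : List String), (∀ k, k ∈ S ↔ k ∈ T) → kd S xs = kd T xs := by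
  intro xs
  induction xs with
  | nil => intro S T h; rfl
  | cons x xs ih =>
    intro S T h
    by_cases hx : PySem.Str.lower x ∈ S
    · rw [kd, kd, if_pos hx, if_pos ((h _).mp hx)]
      exact ih S T h
    · rw [kd, kd, if_neg hx, if_neg (fun c => hx ((h _).mpr c))]
      refine congrArg _ (ih _ _ ?_)
      intro k
      simp only [List.mem_append, List.mem_singleton]
      exact or_congr (h k) Iff.rfl

theorem kd_nil_of_sub : ∀ (xs S : List String), (∀ x ∈ xs, PySem.Str.lower x ∈ S) → kd S xs = [] := by
  intro xs S h
  induction xs with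
  | nil => rfl
  | cons x xs ih =>
    rw [kd, if_pos (h x (List.mem_cons_self))]
    exact ih (fun y hy => h y (List.mem_cons_of_mem _ hy))

theorem mem_lower_kd : ∀ (xs S : List String) (k : String),
    k ∈ (kd S xs).map PySem.Str.lower ↔ (k ∈ xs.map PySem.Str.lower ∧ k ∉ S) := by
  intro xs
  induction xs with
  | nil => intro S k; simp [kd]
  | cons x xs ih =>
    intro S k
    by_cases hx : PySem.Str.lower x ∈ S
    · rw [kd, if_pos hx]
      rw [ih]
      simp only [List.map_cons, List.mem_cons]
      constructor
      · rintro ⟨h1, h2⟩; exact ⟨Or.inr h1, h2⟩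
      · rintro ⟨h1 | h1, h2⟩
        · exact absurd (h1 ▸ hx) h2
        · exact ⟨h1, h2⟩
    · rw [kd, if_neg hx]
      simp only [List.map_cons, List.mem_cons, ih, List.mem_append]
      by_cases hk : k = PySem.Str.lower x
      · subst hk; simp [hx]
      · simp only [hk, false_or]
        tauto

theorem kd_append : ∀ (u v S : List String),
    kd S (u ++ v) = kd S u ++ kd (S ++ u.map PySem.Str.lower) v := by
  intro u
  induction u with
  | nil => intro v S; simp [kd]
  | cons x u ih =>
    intro v S
    by_cases hx : PySem.Str.lower x ∈ S
    · rw [List.cons_append, kd, if_pos hx, kd, if_pos hx, ih]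
      refine congrArg _ (kd_congr _ _ _ ?_)
      intro k
      simp only [List.map_cons, List.mem_append, List.mem_cons]
      constructor
      · rintro (h | h); exacts [Or.inl h, Or.inr (Or.inr h)]
      · rintro (h | h | h); exacts [Or.inl h, Or.inl (h ▸ hx), Or.inr h]
    · rw [List.cons_append, kd, if_neg hx, kd, if_neg hx, ih]
      simp [List.append_assoc]

theorem kd_flatMap_kd (f : String → List String)
    (hf : ∀ s s', PySem.Str.lower s = PySem.Str.lower s' →
      (f s).map PySem.Str.lower = (f s').map PySem.Str.lower) :
    ∀ (ss S T : List String),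
      (∀ s, PySem.Str.lower s ∈ T → ∀ y ∈ f s, PySem.Str.lower y ∈ S) →
      kd S ((kd T ss).flatMap f) = kd S (ss.flatMap f) := by
  intro ss
  induction ss with
  | nil => intro S T H; rfl
  | cons s ss ih =>
    intro S T H
    by_cases hs : PySem.Str.lower s ∈ T
    · rw [kd, if_pos hs, List.flatMap_cons, kd_append, ih S T H]
      have h1 : kd S (f s) = [] := kd_nil_of_sub _ _ (H s hs)
      have h2 : kd (S ++ (f s).map PySem.Str.lower) (ss.flatMap f) = kd S (ss.flatMap f) := by
        refine kd_congr _ _ _ ?_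
        intro k
        simp only [List.mem_append]
        constructor
        · rintro (h | h)
          · exact h
          · rcases List.mem_map.mp h with ⟨y, hy, rfl⟩
            exact H s hs y hy
        · exact Or.inl
      rw [h1, h2, List.nil_append]
    · rw [kd, if_neg hs, List.flatMap_cons, List.flatMap_cons, kd_append, kd_append]
      refine congrArg _ ?_
      have H' : ∀ s', PySem.Str.lower s' ∈ T ++ [PySem.Str.lower s] →
          ∀ y ∈ f s', PySem.Str.lower y ∈ S ++ (f s).map PySem.Str.lower := by
        intro s' hs' y hy
        rcases List.mem_append.mp hs' with h | h
        · exact List.mem_append_left _ (H s' h y hy)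
        · have hss : PySem.Str.lower s' = PySem.Str.lower s := List.mem_singleton.mp h
          refine List.mem_append_right _ ?_
          rw [← hf s' s hss]
          exact List.mem_map.mpr ⟨y, hy, rfl⟩
      exact ih _ _ H'

theorem kd_of_kd (xs S T : List String) (h : ∀ k ∈ T, k ∈ S) : kd S (kd T xs) = kd S xs := by
  have hmain := kd_flatMap_kd (fun s => [s])
    (by intro s s' hss; simpa using hss) xs S T
    (by intro s hs y hy; rw [List.mem_singleton] at hy; subst hy; exact h _ hs)
  simpa using hmain

theorem kd_blockwise (F F' : String → List String)
    (hval : ∀ s S, kd S (F s) = kd S (F' s))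
    (hkeys : ∀ s k, k ∈ (F s).map PySem.Str.lower ↔ k ∈ (F' s).map PySem.Str.lower) :
    ∀ (ss S : List String), kd S (ss.flatMap F) = kd S (ss.flatMap F') := by
  intro ss
  induction ss with
  | nil => intro S; rfl
  | cons s ss ih =>
    intro S
    rw [List.flatMap_cons, List.flatMap_cons, kd_append, kd_append, hval s S]
    refine congrArg _ ?_
    rw [ih]
    refine kd_congr _ _ _ ?_
    intro k
    simp only [List.mem_append]
    exact or_congr Iff.rfl (hkeys s k)

theorem mem_of_mem_kd : ∀ (xs S : List String) (x : String), x ∈ kd S xs → x ∈ xs := by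
  intro xs
  induction xs with
  | nil => intro S x h; simp [kd] at h
  | cons y xs ih =>
    intro S x h
    rw [kd] at h
    split at h
    · exact List.mem_cons_of_mem _ (ih _ _ h)
    · rcases List.mem_cons.mp h with h | h
      · exact h ▸ List.mem_cons_self
      · exact List.mem_cons_of_mem _ (ih _ _ h)

theorem kd_isEmpty (xs : List String) : (kd [] xs).isEmpty = xs.isEmpty := by
  cases xs with
  | nil => rfl
  | cons x xs => rw [kd, if_neg (by simp)]; rfl

-- ---- bridging the ports' folds to kd ----
def pvClean (xs : List String) : Prop := ∀ x ∈ xs, PySem.Str.strip x = x ∧ x ≠ ""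

theorem pvDedupLower_aux : ∀ (xs S acc : List String),
    (xs.foldl
      (fun (st : PySem.Set String × List String) s =>
        let k := PySem.Str.lower s
        if PySem.Set.contains st.1 k then st else (PySem.Set.add st.1 k, st.2 ++ [s]))
      (S, acc)).2 = acc ++ kd S xs := by
  intro xs
  induction xs with
  | nil => intro S acc; simp [kd]
  | cons x xs ih =>
    intro S acc
    by_cases h : PySem.Str.lower x ∈ S
    · have hstep : (fun (st : PySem.Set String × List String) s =>
          let k := PySem.Str.lower s
          if PySem.Set.contains st.1 k then st else (PySem.Set.add st.1 k, st.2 ++ [s]))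
          (S, acc) x = (S, acc) := by
        simp [h]
      rw [List.foldl_cons]
      simp only [hstep]
      rw [ih, kd, if_pos h]
    · have ha : PySem.Set.add S (PySem.Str.lower x) = S ++ [PySem.Str.lower x] := by
        simp [PySem.Set.add, h]
      have hstep : (fun (st : PySem.Set String × List String) s =>
          let k := PySem.Str.lower s
          if PySem.Set.contains st.1 k then st else (PySem.Set.add st.1 k, st.2 ++ [s]))
          (S, acc) x = (S ++ [PySem.Str.lower x], acc ++ [x]) := by
        simp [h]
      rw [List.foldl_cons]
      simp only [hstep]
      rw [ih, kd, if_neg h, List.append_assoc]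
      rfl

theorem pvDedupLower_eq (xs : List String) : pvDedupLower xs = kd [] xs := by
  have := pvDedupLower_aux xs [] []
  simpa [pvDedupLower] using this

-- B's emit fold: full characterisation (seen set AND output) — no cleanliness needed
theorem pvEmit_fold : ∀ (xs S acc : List String),
    xs.foldl pvEmit (S, acc) = (S ++ (kd S xs).map PySem.Str.lower, acc ++ kd S xs) := by
  intro xs
  induction xs with
  | nil => intro S acc; simp [kd]
  | cons x xs ih =>
    intro S acc
    by_cases h : PySem.Str.lower x ∈ S
    · have hstep : pvEmit (S, acc) x = (S, acc) := by
        simp [pvEmit, h]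
      rw [List.foldl_cons]
      simp only [hstep]
      rw [ih, kd, if_pos h]
    · have hstep : pvEmit (S, acc) x = (S ++ [PySem.Str.lower x], acc ++ [x]) := by
        simp [pvEmit, h]
      rw [List.foldl_cons]
      simp only [hstep]
      rw [ih, kd, if_neg h]
      simp [List.append_assoc]

-- A's final dedup loop: on clean lists (entries stripped and nonempty) it is kd
theorem pvFinalDedup_aux : ∀ (xs : List String), pvClean xs → ∀ (S acc : List String),
    (xs.foldl
      (fun (st : PySem.Set String × List String) x =>
        let t := PySem.Str.strip x
        if t = "" then st
        else
          let k := PySem.Str.lower t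
          if PySem.Set.contains st.1 k then st else (PySem.Set.add st.1 k, st.2 ++ [t]))
      (S, acc)).2 = acc ++ kd S xs := by
  intro xs
  induction xs with
  | nil => intro _ S acc; simp [kd]
  | cons x xs ih =>
    intro hcl S acc
    obtain ⟨hsx, hne⟩ := hcl x List.mem_cons_self
    have hcl' : pvClean xs := fun y hy => hcl y (List.mem_cons_of_mem _ hy)
    have hne' : ¬ (PySem.Str.strip x = "") := by rw [hsx]; exact hne
    by_cases h : PySem.Str.lower x ∈ S
    · have hstep : (fun (st : PySem.Set String × List String) x =>
          let t := PySem.Str.strip x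
          if t = "" then st
          else
            let k := PySem.Str.lower t
            if PySem.Set.contains st.1 k then st else (PySem.Set.add st.1 k, st.2 ++ [t]))
          (S, acc) x = (S, acc) := by
        simp [hsx, h, hne]
      rw [List.foldl_cons]
      simp only [hstep]
      rw [ih hcl', kd, if_pos h]
    · have hstep : (fun (st : PySem.Set String × List String) x =>
          let t := PySem.Str.strip x
          if t = "" then st
          else
            let k := PySem.Str.lower t
            if PySem.Set.contains st.1 k then st else (PySem.Set.add st.1 k, st.2 ++ [t]))
          (S, acc) x = (S ++ [PySem.Str.lower x], acc ++ [x]) := by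
        simp [hsx, h, hne]
      rw [List.foldl_cons]
      simp only [hstep]
      rw [ih hcl', kd, if_neg h, List.append_assoc]
      rfl

theorem pvFinalDedup_eq (xs : List String) (h : pvClean xs) : pvFinalDedup xs = kd [] xs := by
  have := pvFinalDedup_aux xs h [] []
  simpa [pvFinalDedup] using this

-- ---- the combination blocks ----
def pvBlk (dn : List String) (s : String) : List String :=
  dn.flatMap (fun d => [pvCombo s d, pvComboOf s d])

theorem pvComboFold_eq : ∀ (heads dn acc : List String),
    heads.foldl
      (fun acc s => dn.foldl (fun acc d => acc ++ [pvCombo s d] ++ [pvComboOf s d]) acc) acc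
    = acc ++ heads.flatMap (pvBlk dn) := by
  intro heads
  induction heads with
  | nil => intro dn acc; simp
  | cons s heads ih =>
    intro dn acc
    rw [List.foldl_cons, ih, List.flatMap_cons]
    have hinner : dn.foldl (fun acc d => acc ++ [pvCombo s d] ++ [pvComboOf s d]) acc
        = acc ++ pvBlk dn s := by
      have hfun : (fun (acc : List String) d => acc ++ [pvCombo s d] ++ [pvComboOf s d])
          = fun (acc : List String) d => acc ++ [pvCombo s d, pvComboOf s d] := by
        funext acc d; simp
      rw [hfun, PySem.List.foldl_append_eq_flatMap]
      rfl
    rw [hinner, List.append_assoc]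

-- B's nested emit loops, restated as one emit fold over the flattened block list
theorem pvEmitInner_eq (s : String) : ∀ (dn : List String) (st : PySem.Set String × List String),
    dn.foldl (fun st d => pvEmit (pvEmit st (pvCombo s d)) (pvComboOf s d)) st
      = (dn.flatMap (fun d => [pvCombo s d, pvComboOf s d])).foldl pvEmit st := by
  intro dn
  induction dn with
  | nil => intro st; simp
  | cons d dn ih =>
    intro st
    simp only [List.foldl_cons, List.flatMap_cons, List.foldl_append, List.foldl_nil]
    exact ih _

theorem pvEmitOuter_eq (dn : List String) :
    ∀ (heads : List String) (st : PySem.Set String × List String),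
    heads.foldl
      (fun st s => dn.foldl (fun st d => pvEmit (pvEmit st (pvCombo s d)) (pvComboOf s d)) st) st
      = (heads.flatMap (pvBlk dn)).foldl pvEmit st := by
  intro heads
  induction heads with
  | nil => intro st; simp
  | cons s heads ih =>
    intro st
    simp only [List.foldl_cons, List.flatMap_cons, List.foldl_append, pvBlk]
    rw [pvEmitInner_eq, ih]

theorem pvMap_lower_blk (l : List String) (s : String) :
    (pvBlk l s).map PySem.Str.lower
      = l.flatMap (fun d =>
          [pvCombo (PySem.Str.lower s) (PySem.Str.lower d),
           pvComboOf (PySem.Str.lower s) (PySem.Str.lower d)]) := by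
  rw [pvBlk, List.map_flatMap]
  refine List.flatMap_congr ?_
  intro d _
  simp [pvLower_combo, pvLower_comboOf]

theorem pvBlk_hf (l : List String) : ∀ s s', PySem.Str.lower s = PySem.Str.lower s' →
    (pvBlk l s).map PySem.Str.lower = (pvBlk l s').map PySem.Str.lower := by
  intro s s' h
  rw [pvMap_lower_blk, pvMap_lower_blk, h]

theorem pvBlkElem_hf (s : String) : ∀ d d', PySem.Str.lower d = PySem.Str.lower d' →
    ([pvCombo s d, pvComboOf s d]).map PySem.Str.lower
      = ([pvCombo s d', pvComboOf s d']).map PySem.Str.lower := by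
  intro d d' h
  simp [pvLower_combo, pvLower_comboOf, h]

theorem pvBlk_val (dIn : List String) : ∀ (s : String) (S : List String),
    kd S (pvBlk (kd [] dIn) s) = kd S (pvBlk dIn s) := by
  intro s S
  rw [pvBlk, pvBlk]
  exact kd_flatMap_kd (fun d => [pvCombo s d, pvComboOf s d]) (pvBlkElem_hf s) dIn S []
    (by intro d hd; simp at hd)

theorem pvMem_map_lower_blk (l : List String) (s : String) (k : String) :
    k ∈ (pvBlk l s).map PySem.Str.lower ↔
      ∃ kl ∈ l.map PySem.Str.lower,
        k = pvCombo (PySem.Str.lower s) kl ∨ k = pvComboOf (PySem.Str.lower s) kl := by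
  rw [pvMap_lower_blk]
  simp only [List.mem_flatMap, List.mem_map, List.mem_cons, List.not_mem_nil,
    or_false]
  constructor
  · rintro ⟨d, hd, h⟩
    exact ⟨PySem.Str.lower d, ⟨d, hd, rfl⟩, by tauto⟩
  · rintro ⟨kl, ⟨d, hd, rfl⟩, h⟩
    exact ⟨d, hd, by tauto⟩

theorem pvBlk_keys (dIn : List String) : ∀ (s k : String),
    k ∈ (pvBlk (kd [] dIn) s).map PySem.Str.lower ↔ k ∈ (pvBlk dIn s).map PySem.Str.lower := by
  intro s k
  rw [pvMem_map_lower_blk, pvMem_map_lower_blk]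
  constructor
  · rintro ⟨kl, hkl, h⟩
    exact ⟨kl, ((mem_lower_kd dIn [] kl).mp hkl).1, h⟩
  · rintro ⟨kl, hkl, h⟩
    exact ⟨kl, (mem_lower_kd dIn [] kl).mpr ⟨hkl, by simp⟩, h⟩

-- ---- the core: A's out list and B's emitted sequence dedup to the same thing ----
theorem pvCore (sIn dIn : List String) :
    kd [] (pvC7 ++ kd [] sIn
        ++ (if (kd [] sIn).isEmpty then pvDefaultHeads else kd [] sIn).flatMap (pvBlk (kd [] dIn)))
    = kd [] (pvC7 ++ sIn
        ++ (if sIn.isEmpty then pvDefaultHeads else sIn).flatMap (pvBlk dIn)) := by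
  set CA := (if (kd [] sIn).isEmpty then pvDefaultHeads else kd [] sIn).flatMap (pvBlk (kd [] dIn))
    with hCA
  set CB := (if sIn.isEmpty then pvDefaultHeads else sIn).flatMap (pvBlk dIn) with hCB
  rw [List.append_assoc pvC7 (kd [] sIn) CA, List.append_assoc pvC7 sIn CB,
    kd_append pvC7 (kd [] sIn ++ CA) [], kd_append pvC7 (sIn ++ CB) [],
    kd_append (kd [] sIn) CA ([] ++ pvC7.map PySem.Str.lower),
    kd_append sIn CB ([] ++ pvC7.map PySem.Str.lower)]
  refine congrArg _ ?_
  have hfirst : kd ([] ++ pvC7.map PySem.Str.lower) (kd [] sIn)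
      = kd ([] ++ pvC7.map PySem.Str.lower) sIn :=
    kd_of_kd _ _ _ (by intro k hk; simp at hk)
  rw [hfirst]
  refine congrArg _ ?_
  have hseen : ∀ k, k ∈ ([] ++ pvC7.map PySem.Str.lower) ++ (kd [] sIn).map PySem.Str.lower ↔
      k ∈ ([] ++ pvC7.map PySem.Str.lower) ++ sIn.map PySem.Str.lower := by
    intro k
    simp only [List.mem_append, mem_lower_kd, List.not_mem_nil, not_false_iff, and_true]
    try tauto
  rw [kd_congr CA _ _ hseen]
  set S1 := ([] ++ pvC7.map PySem.Str.lower) ++ sIn.map PySem.Str.lower with hS1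
  rw [hCA, hCB, kd_isEmpty]
  by_cases hempty : sIn.isEmpty
  · rw [if_pos hempty, if_pos hempty]
    exact kd_blockwise _ _ (fun s S => pvBlk_val dIn s S) (fun s k => pvBlk_keys dIn s k)
      pvDefaultHeads S1
  · rw [if_neg hempty, if_neg hempty]
    have step1 : kd S1 ((kd [] sIn).flatMap (pvBlk (kd [] dIn)))
        = kd S1 ((kd [] sIn).flatMap (pvBlk dIn)) :=
      kd_blockwise _ _ (fun s S => pvBlk_val dIn s S) (fun s k => pvBlk_keys dIn s k)
        (kd [] sIn) S1
    have step2 : kd S1 ((kd [] sIn).flatMap (pvBlk dIn)) = kd S1 (sIn.flatMap (pvBlk dIn)) :=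
      kd_flatMap_kd (pvBlk dIn) (pvBlk_hf dIn) sIn S1 [] (by intro s hs; simp at hs)
    rw [step1, step2]

-- ---- cleanliness ----
theorem pvClean_stripClean (l : List String) : pvClean (pvStripClean l) := by
  intro x hx
  simp only [pvStripClean, List.mem_filter, List.mem_map, decide_eq_true_eq] at hx
  obtain ⟨⟨o, _, rfl⟩, hne⟩ := hx
  exact ⟨pvStrip_idem o, hne⟩

theorem pvClean_append {xs ys : List String} (hx : pvClean xs) (hy : pvClean ys) :
    pvClean (xs ++ ys) := by
  intro x hmem
  rcases List.mem_append.mp hmem with h | h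
  · exact hx x h
  · exact hy x h

theorem pvClean_c7 : pvClean pvC7 := by
  intro x hx
  fin_cases hx <;> exact ⟨by decide, by decide⟩

theorem pvClean_blk (heads dn : List String) : pvClean (heads.flatMap (pvBlk dn)) := by
  intro x hx
  rcases List.mem_flatMap.mp hx with ⟨s, _, hxs⟩
  rcases List.mem_flatMap.mp hxs with ⟨d, _, hxd⟩
  rcases List.mem_cons.mp hxd with h | h
  · exact h ▸ ⟨pvStrip_combo s d, pvCombo_ne s d⟩
  · rw [List.mem_singleton] at h
    exact h ▸ ⟨pvStrip_comboOf s d, pvComboOf_ne s d⟩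

theorem pvClean_kd {xs : List String} (h : pvClean xs) (S : List String) : pvClean (kd S xs) :=
  fun x hx => h x (mem_of_mem_kd xs S x hx)

-- ---- assembly ----
theorem pvMain (seniorities departments : Option (List String)) :
    build_query_keywords seniorities departments = build_query_keywords_alt seniorities departments := by
  simp only [build_query_keywords, build_query_keywords_alt]
  set sIn := pvStripClean (seniorities.getD []) with hsIn
  set dIn := pvStripClean (departments.getD []) with hdIn
  by_cases hguard : (sIn.isEmpty && dIn.isEmpty) = true
  · rw [if_pos hguard, if_pos hguard]
  · rw [if_neg hguard, if_neg hguard]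
    have hsClean : pvClean sIn := pvClean_stripClean _
    -- A's side: nested append-folds → flatMap form, pre-dedups → kd
    rw [pvComboFold_eq, pvDedupLower_eq, pvDedupLower_eq]
    set AOut := (pvC7 ++ kd [] sIn)
        ++ (if (kd [] sIn).isEmpty then pvDefaultHeads else kd [] sIn).flatMap (pvBlk (kd [] dIn))
      with hAOut
    -- B's side: the threaded emit loops → one emit fold over the flattened sequence
    rw [pvEmitOuter_eq]
    have hc7 : (["CEO", "Founder", "\"Co-Founder\"", "Owner", "President", "\"Managing Director\"",
        "\"General Manager\""] : List String) = pvC7 := rfl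
    have hdh : (["Head", "Director", "VP", "SVP", "Vice President", "Senior Vice President"] :
        List String) = pvDefaultHeads := rfl
    rw [hc7, hdh]
    set BOut := (pvC7 ++ sIn) ++ (if sIn.isEmpty then pvDefaultHeads else sIn).flatMap (pvBlk dIn)
      with hBOut
    have hACl : pvClean AOut := by
      rw [hAOut]
      exact pvClean_append (pvClean_append pvClean_c7 (pvClean_kd hsClean []))
        (pvClean_blk _ _)
    have hkd : kd [] AOut = kd [] BOut := by
      rw [hAOut, hBOut]
      exact pvCore sIn dIn
    -- B's chained folds = one fold over BOut
    have hSnil : (PySem.Set.ofList ([] : List String)) = ([] : List String) := rfl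
    have hBfold : ((if sIn.isEmpty = true then pvDefaultHeads else sIn).flatMap (pvBlk dIn)).foldl
        pvEmit (sIn.foldl pvEmit (pvC7.foldl pvEmit (PySem.Set.ofList [], [])))
        = BOut.foldl pvEmit (PySem.Set.ofList [], []) := by
      rw [hBOut, List.foldl_append, List.foldl_append]
    rw [hBfold, hSnil]
    rw [pvEmit_fold BOut [] []]
    rw [pvFinalDedup_eq AOut hACl, hkd]
    simp

-- ===== VERDICT (by name: the statement is the Claim_ definition above) =====
theorem build_query_keywords_spec : Claim_equal_build_query_keywords := by
  intro seniorities departments _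
  unfold Spec_build_query_keywords
  exact pvMain seniorities departments
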